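-- pv_equiv track=rewrite | github.com/kevinhocs/workout-volume-analyzer | analytics.py | detect_plateaus
-- ===== SOURCE A (Python) =====
-- def detect_plateaus(exercise_weekly_1rm, threshold=2):
--
--     plateaus = {}
--
--     for exercise, weeks in exercise_weekly_1rm.items():
--
--         if len(weeks) < threshold + 1:
--             continue
--
--         sorted_weeks = sorted(weeks.items())
--
--         best = None
--         weeks_since_pr = 0
--
--         for _, value in sorted_weeks:
--
--             if best is None or value > best:
--                 best = value
--                 weeks_since_pr = 0
--             else:
--                 weeks_since_pr += 1
--
--         if weeks_since_pr >= threshold: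
--             plateaus[exercise] = weeks_since_pr
--
--     return plateaus
-- ===== SOURCE B (Python) =====
-- def detect_plateaus(exercise_weekly_1rm, threshold=2):
--     plateaus = {}
--     for exercise, weeks in exercise_weekly_1rm.items():
--         if len(weeks) < threshold + 1:
--             continue
--         vals = [v for _, v in sorted(weeks.items())]
--         if vals:
--             weeks_since_pr = len(vals) - 1 - vals.index(max(vals))
--         else:
--             weeks_since_pr = 0
--         if weeks_since_pr >= threshold:
--             plateaus[exercise] = weeks_since_pr
--     return plateaus
-- ===== Notes on version B (the rewrite author's own statement) =====
-- stated objective: simpler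
-- what changed: B replaces A's incremental best/counter scan over the sorted weekly values with a direct computation: weeks since PR = len(vals) - 1 - vals.index(max(vals)), the distance from the first occurrence of the maximum to the end.
import Mathlib
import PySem

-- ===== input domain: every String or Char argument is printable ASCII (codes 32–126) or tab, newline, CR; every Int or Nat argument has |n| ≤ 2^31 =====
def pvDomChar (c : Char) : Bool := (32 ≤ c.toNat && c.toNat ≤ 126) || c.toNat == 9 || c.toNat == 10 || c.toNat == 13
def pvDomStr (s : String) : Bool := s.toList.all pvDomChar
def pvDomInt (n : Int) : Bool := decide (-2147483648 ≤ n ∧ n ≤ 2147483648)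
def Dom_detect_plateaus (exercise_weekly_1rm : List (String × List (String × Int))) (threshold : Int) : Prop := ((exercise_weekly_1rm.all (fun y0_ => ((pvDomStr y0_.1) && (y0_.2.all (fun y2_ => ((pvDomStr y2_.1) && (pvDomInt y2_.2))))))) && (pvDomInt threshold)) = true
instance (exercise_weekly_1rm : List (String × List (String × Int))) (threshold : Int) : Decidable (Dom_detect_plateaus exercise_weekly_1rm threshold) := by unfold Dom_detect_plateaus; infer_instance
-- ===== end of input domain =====

-- B replaces A's incremental best/counter scan with a direct computation (weeks since PR =
-- last index minus first index of the maximum); same cost, simpler decomposition.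

-- ===== PORT A =====
def detect_plateaus (exercise_weekly_1rm : List (String × List (String × Int))) (threshold : Int) : List (String × Int) :=
  (exercise_weekly_1rm.foldl (fun (plateaus : PySem.Dict String Int) p =>
    if PySem.List.len p.2 < threshold + 1 then plateaus
    else
      let sorted_weeks := PySem.List.sorted2 p.2 Prod.fst Prod.snd
      let st := sorted_weeks.foldl (fun (st : Option Int × Int) q =>
        match st.1 with
        | none => (some q.2, (0 : Int))
        | some best => if q.2 > best then (some q.2, 0) else (some best, st.2 + 1)) (none, 0)
      if st.2 ≥ threshold then PySem.Dict.insert plateaus p.1 st.2 else plateaus)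
    (PySem.Dict.mk [])).items

-- ===== PORT B =====
def detect_plateaus_alt (exercise_weekly_1rm : List (String × List (String × Int))) (threshold : Int) : List (String × Int) :=
  (exercise_weekly_1rm.foldl (fun (plateaus : PySem.Dict String Int) p =>
    if PySem.List.len p.2 < threshold + 1 then plateaus
    else
      let vals := (PySem.List.sorted2 p.2 Prod.fst Prod.snd).map Prod.snd
      -- 'if vals: len(vals)-1-vals.index(max(vals)) else: 0'; max? is none exactly on the
      -- empty list, and index? of the max is always some (the inner none is unreachable)
      let weeks_since_pr : Int :=
        match PySem.List.max? vals (fun y => y) with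
        | none => 0
        | some m =>
          match PySem.List.index? vals m with
          | some i => PySem.List.len vals - 1 - (i : Int)
          | none => 0
      if weeks_since_pr ≥ threshold then PySem.Dict.insert plateaus p.1 weeks_since_pr else plateaus)
    (PySem.Dict.mk [])).items

-- ===== PRECONDITION & SPEC =====
def Spec_detect_plateaus (exercise_weekly_1rm : List (String × List (String × Int))) (threshold : Int) (out : List (String × Int)) : Prop := out = detect_plateaus_alt exercise_weekly_1rm threshold
instance (exercise_weekly_1rm : List (String × List (String × Int))) (threshold : Int) (out : List (String × Int)) : Decidable (Spec_detect_plateaus exercise_weekly_1rm threshold out) := by unfold Spec_detect_plateaus; infer_instance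

-- ===== CLAIM (what is proved, stated in full; the proofs are below) =====
def Claim_equal_detect_plateaus : Prop := ∀ (exercise_weekly_1rm : List (String × List (String × Int))) (threshold : Int), Dom_detect_plateaus exercise_weekly_1rm threshold → Spec_detect_plateaus exercise_weekly_1rm threshold (detect_plateaus exercise_weekly_1rm threshold)

-- ===== LEMMAS AND PROOFS =====

-- the max of l ++ [x], from the max of a nonempty l
lemma max?_append_singleton (l : List Int) (x M : Int)
    (h : PySem.List.max? l (fun y => y) = some M) :
    PySem.List.max? (l ++ [x]) (fun y => y) = some (max M x) := by
  cases l with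
  | nil => simp [PySem.List.max?] at h
  | cons a t =>
    rw [PySem.List.max?_id_cons] at h
    have : (a :: t) ++ [x] = a :: (t ++ [x]) := by simp
    rw [this, PySem.List.max?_id_cons, List.foldl_append]
    simp_all

-- A's inner loop over the sorted (week, value) pairs computes
-- (max of the values, len - 1 - first index of the max)
lemma inner_eq (sw : List (String × Int)) :
    (sw.foldl (fun (st : Option Int × Int) q =>
        match st.1 with
        | none => (some q.2, (0 : Int))
        | some best => if q.2 > best then (some q.2, 0) else (some best, st.2 + 1)) (none, 0))
    = (PySem.List.max? (sw.map Prod.snd) (fun y => y),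
       match PySem.List.max? (sw.map Prod.snd) (fun y => y) with
       | none => (0 : Int)
       | some m =>
         match PySem.List.index? (sw.map Prod.snd) m with
         | some i => PySem.List.len (sw.map Prod.snd) - 1 - (i : Int)
         | none => 0) := by
  induction sw using List.reverseRecOn with
  | nil => simp [PySem.List.max?]
  | append_singleton l q ih =>
    rw [List.foldl_append, ih]
    simp only [List.map_append, List.map_cons, List.map_nil]
    set vl := l.map Prod.snd with hvl
    cases hM : PySem.List.max? vl (fun y => y) with
    | none =>
      have hl : vl = [] := (PySem.List.max?_eq_none_iff _ _).mp hM
      rw [hl]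
      simp [PySem.List.max?_id_cons, PySem.List.len]
    | some M =>
      have hmem : M ∈ vl := PySem.List.max?_mem hM
      have hle : ∀ y ∈ vl, y ≤ M := fun y hy => PySem.List.max?_isMax hM y hy
      rw [max?_append_singleton vl q.2 M hM]
      by_cases hx : q.2 > M
      · -- new record: the max is now q.2, at position vl.length
        have hmax : max M q.2 = q.2 := max_eq_right (le_of_lt hx)
        have hnotin : q.2 ∉ vl := fun hxin => absurd (hle q.2 hxin) (by omega)
        have hidx := PySem.List.index?_append_singleton_self vl q.2 hnotin
        rw [PySem.List.index?_eq_idxOf?] at hidx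
        simp [hx, hmax, hidx, PySem.List.len_eq]
      · -- no record: the max and its first index are unchanged, the counter grows by one
        have hmax : max M q.2 = M := max_eq_left (by omega)
        obtain ⟨i, hi⟩ := Option.isSome_iff_exists.mp ((PySem.List.index?_isSome_iff vl M).mpr hmem)
        have hidx := PySem.List.index?_append_of_mem [q.2] hmem
        rw [PySem.List.index?_eq_idxOf?, PySem.List.index?_eq_idxOf?] at hidx
        rw [PySem.List.index?_eq_idxOf?] at hi
        simp [hx, hmax, hidx, hi, PySem.List.len_eq]
        ring

-- ===== VERDICT (by name: the statement is the Claim_ definition above) =====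
theorem detect_plateaus_spec : Claim_equal_detect_plateaus := by
  intro xs t _
  unfold Spec_detect_plateaus detect_plateaus detect_plateaus_alt
  refine congrArg PySem.Dict.items ?_
  apply PySem.List.foldl_congr_mem
  intro acc p _
  simp only [inner_eq]
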